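-- pv_equiv track=rewrite | github.com/dbmum/Hashing-algorithm | Hash_Functions.py | hex_step
-- ===== SOURCE A (Python) =====
-- def hex_step(data, number_of_steps):
--     """
--     Input a hexadecimal string, return a 'stepped string' where letters remain as letters,
--     numbers remain as numbers, but they 'increase; in value by one, if they go over range,
--     they go back to the beginning, staying as hexadecimal code. the more times you step,
--     the more randomized the values become, as long as you step less than 30 times you will
--     get new patterns.
--     """
--     hex_step_table = {
--         'a': 'b',
--         'b': 'c',
--         'c': 'd',
--         'd': 'e',
--         'e': 'f',
--         'f': 'a',
--         '1': '2',
--         '2': '3',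
--         '3': '4',
--         '4': '5',
--         '5': '6',
--         '6': '7',
--         '7': '8',
--         '8': '9',
--         '9': '1'}
--
--     stepped_data = ""
--     for char in data:
--         if char in hex_step_table:
--
--             for _ in range(number_of_steps):
--                 char = hex_step_table[char]
--
--             stepped_data += char
--
--     return stepped_data
-- ===== SOURCE B (Python) =====
-- def hex_step(data, number_of_steps):
--     k = number_of_steps if number_of_steps > 0 else 0
--     kl = k % 6
--     kd = k % 9
--     def step(c):
--         if 'a' <= c <= 'f':
--             return chr(ord('a') + (ord(c) - ord('a') + kl) % 6)
--         return chr(ord('1') + (ord(c) - ord('1') + kd) % 9)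
--     return ''.join(step(c) for c in data if 'a' <= c <= 'f' or '1' <= c <= '9')
-- ===== Notes on version B (the rewrite author's own statement) =====
-- stated objective: faster
-- what changed: Replaces the per-character loop of number_of_steps single table lookups with a closed-form modular shift (steps mod 6 for letters a-f, mod 9 for digits 1-9) computed once, turning O(n*k) into O(n).
import Mathlib
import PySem

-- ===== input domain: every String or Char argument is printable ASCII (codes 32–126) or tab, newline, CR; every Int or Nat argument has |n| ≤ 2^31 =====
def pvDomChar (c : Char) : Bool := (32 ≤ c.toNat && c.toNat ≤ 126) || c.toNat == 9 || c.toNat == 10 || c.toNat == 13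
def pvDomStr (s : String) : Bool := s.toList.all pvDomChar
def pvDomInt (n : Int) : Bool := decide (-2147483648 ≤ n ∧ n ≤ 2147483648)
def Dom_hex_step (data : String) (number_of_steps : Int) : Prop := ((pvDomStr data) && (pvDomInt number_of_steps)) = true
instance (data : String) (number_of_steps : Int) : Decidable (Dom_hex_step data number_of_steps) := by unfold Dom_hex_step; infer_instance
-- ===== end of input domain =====

-- B replaces A's per-character inner loop of `number_of_steps` table lookups by a
-- closed-form modular shift (steps mod 6 for letters, mod 9 for digits): O(n·k) → O(n).

-- ===== PORT A =====
-- A's dict literal `hex_step_table`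
def hexStepTable : PySem.Dict Char Char :=
  PySem.Dict.ofList [('a','b'),('b','c'),('c','d'),('d','e'),('e','f'),('f','a'),
    ('1','2'),('2','3'),('3','4'),('4','5'),('5','6'),('6','7'),('7','8'),('8','9'),('9','1')]

-- A builds `stepped_data` by string `+=`; ported as a List Char accumulator wrapped in
-- String.ofList at the end (Lean's own String append is kernel-opaque).
def hex_step (data : String) (number_of_steps : Int) : String :=
  String.ofList (data.toList.foldl (fun acc ch =>
    if hexStepTable.contains ch then
      acc ++ [(PySem.List.pyRange 0 number_of_steps 1).foldl
                (fun c _ => hexStepTable.getD c c) ch]   -- `char = hex_step_table[char]`: key always present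
    else acc) [])

-- ===== PORT B =====
-- B's per-character closed-form step (helper `step` in Source B)
def hexStepClosed (kl kd : Nat) (c : Char) : Char :=
  if 'a' ≤ c ∧ c ≤ 'f' then Char.ofNat (97 + ((c.toNat - 97 + kl) % 6))
  else Char.ofNat (49 + ((c.toNat - 49 + kd) % 9))

def hex_step_alt (data : String) (number_of_steps : Int) : String :=
  let k : Nat := (if number_of_steps > 0 then number_of_steps else 0).toNat
  let kl := k % 6
  let kd := k % 9
  String.ofList (((data.toList.filter
      (fun c => (decide ('a' ≤ c) && decide (c ≤ 'f')) || (decide ('1' ≤ c) && decide (c ≤ '9')))).map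
      (hexStepClosed kl kd)))

-- ===== PRECONDITION & SPEC =====
def Spec_hex_step (data : String) (number_of_steps : Int) (out : String) : Prop := out = hex_step_alt data number_of_steps
instance (data : String) (number_of_steps : Int) (out : String) : Decidable (Spec_hex_step data number_of_steps out) := by unfold Spec_hex_step; infer_instance

-- ===== CLAIM (what is proved, stated in full; the proofs are below) =====
def Claim_equal_hex_step : Prop := ∀ (data : String) (number_of_steps : Int), Dom_hex_step data number_of_steps → Spec_hex_step data number_of_steps (hex_step data number_of_steps)

-- ===== LEMMAS AND PROOFS =====

def hexKeys : List Char := ['a','b','c','d','e','f','1','2','3','4','5','6','7','8','9']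

lemma hexStepTable_contains_iff (c : Char) : hexStepTable.contains c = true ↔ c ∈ hexKeys := by
  rw [show hexStepTable = PySem.Dict.mk [('a','b'),('b','c'),('c','d'),('d','e'),('e','f'),('f','a'),
    ('1','2'),('2','3'),('3','4'),('4','5'),('5','6'),('6','7'),('7','8'),('8','9'),('9','1')] from by decide]
  simp [hexKeys, PySem.Dict.contains_mk]
  tauto

lemma bTest_iff (c : Char) :
    ((decide ('a' ≤ c) && decide (c ≤ 'f')) || (decide ('1' ≤ c) && decide (c ≤ '9'))) = true ↔ c ∈ hexKeys := by
  have hofn : c = Char.ofNat c.toNat := (Char.ofNat_toNat c).symm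
  simp only [hexKeys, Bool.or_eq_true, Bool.and_eq_true, decide_eq_true_eq, List.mem_cons,
    List.not_mem_nil, or_false, Char.le_def, UInt32.le_iff_toNat_le]
  constructor
  · rintro (⟨h1, h2⟩ | ⟨h1, h2⟩) <;>
    · simp only [show ('a').val.toNat = 97 from rfl, show ('f').val.toNat = 102 from rfl,
        show ('1').val.toNat = 49 from rfl, show ('9').val.toNat = 57 from rfl] at h1 h2
      have hv : c.val.toNat = c.toNat := rfl
      rw [hv] at h1 h2
      interval_cases h : c.toNat <;> simp [hofn]
  · rintro (rfl|rfl|rfl|rfl|rfl|rfl|rfl|rfl|rfl|rfl|rfl|rfl|rfl|rfl|rfl) <;> decide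

lemma contains_eq_bTest (c : Char) :
    hexStepTable.contains c
      = ((decide ('a' ≤ c) && decide (c ≤ 'f')) || (decide ('1' ≤ c) && decide (c ≤ '9'))) :=
  Bool.eq_iff_iff.mpr ((hexStepTable_contains_iff c).trans (bTest_iff c).symm)

-- A's inner loop ignores the range elements: it is function iteration
lemma foldl_const_eq_iterate (f : Char → Char) (l : List Int) (c : Char) :
    l.foldl (fun ch _ => f ch) c = f^[l.length] c := by
  induction l generalizing c with
  | nil => rfl
  | cons x xs ih => simp [List.foldl_cons, ih, Function.iterate_succ_apply]

def stepA (c : Char) : Char := hexStepTable.getD c c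

def hexLetters : List Char := ['a','b','c','d','e','f']
def hexDigits : List Char := ['1','2','3','4','5','6','7','8','9']

lemma iterate_letter (m : Nat) (c : Char) (hc : c ∈ hexLetters) :
    stepA^[m] c = Char.ofNat (97 + ((c.toNat - 97 + m) % 6)) := by
  induction m generalizing c with
  | zero => fin_cases hc <;> decide
  | succ m ih =>
    rw [Function.iterate_succ_apply]
    fin_cases hc <;>
    · simp only [show stepA 'a' = 'b' from by decide, show stepA 'b' = 'c' from by decide,
        show stepA 'c' = 'd' from by decide, show stepA 'd' = 'e' from by decide,
        show stepA 'e' = 'f' from by decide, show stepA 'f' = 'a' from by decide]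
      rw [ih]
      · congr 1
        simp only [show ('a').toNat = 97 from rfl, show ('b').toNat = 98 from rfl,
          show ('c').toNat = 99 from rfl, show ('d').toNat = 100 from rfl,
          show ('e').toNat = 101 from rfl, show ('f').toNat = 102 from rfl]
        omega
      · decide

lemma iterate_digit (m : Nat) (c : Char) (hc : c ∈ hexDigits) :
    stepA^[m] c = Char.ofNat (49 + ((c.toNat - 49 + m) % 9)) := by
  induction m generalizing c with
  | zero => fin_cases hc <;> decide
  | succ m ih =>
    rw [Function.iterate_succ_apply]
    fin_cases hc <;>
    · simp only [show stepA '1' = '2' from by decide, show stepA '2' = '3' from by decide,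
        show stepA '3' = '4' from by decide, show stepA '4' = '5' from by decide,
        show stepA '5' = '6' from by decide, show stepA '6' = '7' from by decide,
        show stepA '7' = '8' from by decide, show stepA '8' = '9' from by decide,
        show stepA '9' = '1' from by decide]
      rw [ih]
      · congr 1
        simp only [show ('1').toNat = 49 from rfl, show ('2').toNat = 50 from rfl,
          show ('3').toNat = 51 from rfl, show ('4').toNat = 52 from rfl,
          show ('5').toNat = 53 from rfl, show ('6').toNat = 54 from rfl,
          show ('7').toNat = 55 from rfl, show ('8').toNat = 56 from rfl,
          show ('9').toNat = 57 from rfl]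
        omega
      · decide

lemma key_split (c : Char) (hc : c ∈ hexKeys) : c ∈ hexLetters ∨ c ∈ hexDigits := by
  fin_cases hc <;> first | exact Or.inl (by decide) | exact Or.inr (by decide)

lemma stepped_eq_closed (n : Int) (c : Char) (hc : c ∈ hexKeys) :
    stepA^[n.toNat] c = hexStepClosed (n.toNat % 6) (n.toNat % 9) c := by
  rcases key_split c hc with h | h
  · rw [iterate_letter _ _ h]
    have hif : ('a' ≤ c ∧ c ≤ 'f') := by fin_cases h <;> exact ⟨by decide, by decide⟩
    rw [hexStepClosed, if_pos hif]
    congr 1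
    have hb : 97 ≤ c.toNat ∧ c.toNat ≤ 102 := by fin_cases h <;> exact ⟨by decide, by decide⟩
    omega
  · rw [iterate_digit _ _ h]
    have hif : ¬ ('a' ≤ c ∧ c ≤ 'f') := by fin_cases h <;> simp
    rw [hexStepClosed, if_neg hif]
    congr 1
    have hb : 49 ≤ c.toNat ∧ c.toNat ≤ 57 := by fin_cases h <;> exact ⟨by decide, by decide⟩
    omega

-- ===== VERDICT (by name: the statement is the Claim_ definition above) =====
theorem hex_step_spec : Claim_equal_hex_step := by
  intro data n _
  unfold Spec_hex_step
  have hk : (if n > 0 then n else 0).toNat = n.toNat := by split <;> omega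
  simp only [hex_step, hex_step_alt]
  rw [hk]
  congr 1
  rw [PySem.List.foldl_append_if, List.nil_append,
      List.filter_congr (fun c _ => contains_eq_bTest c)]
  apply List.map_congr_left
  intro c hcmem
  have hc : c ∈ hexKeys := (bTest_iff c).mp (List.mem_filter.mp hcmem).2
  rw [show (fun (c : Char) (_ : Int) => hexStepTable.getD c c)
        = (fun (c : Char) (_ : Int) => stepA c) from rfl,
     foldl_const_eq_iterate stepA, PySem.List.length_pyRange_one]
  simpa using stepped_eq_closed n c hc
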